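-- pv_equiv track=rewrite | github.com/dhsong95/programmers-algorithm-challenges | 2019 KAKAO BLIND RECRUITMENT/블록 게임.py | possible_to_delete
-- ===== SOURCE A (Python) =====
-- def get_target_block(base_rdx, base_cdx, board, shape):
--     target = board[base_rdx][base_cdx]
--     if target > 0:
--         return target
--
--     for rdx in range(base_rdx, base_rdx+shape[0]):
--         for cdx in range(base_cdx, base_cdx+shape[1]):
--             if board[rdx][cdx] > 0:
--                 target = board[rdx][cdx]
--                 return target
--
--     return target
--
-- def possible_to_delete(base_rdx, base_cdx, board, shape):
--     N = len(board)
--     if base_rdx + shape[0] > N or base_cdx + shape[1] > N: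
--         return False
--
--     target = get_target_block(base_rdx, base_cdx, board, shape)
--     # Only 0 or -1
--     if target <= 0:
--         return False
--
--     counter = 0
--     for rdx in range(base_rdx, base_rdx+shape[0]):
--         for cdx in range(base_cdx, base_cdx+shape[1]):
--             if board[rdx][cdx] == 0:
--                 return False
--
--             if board[rdx][cdx] == target:
--                 counter += 1
--             elif board[rdx][cdx] > 0 and board[rdx][cdx] != target:
--                 return False
--
--     if counter != 4:
--         return False
--
--     for rdx in range(base_rdx, base_rdx+shape[0]):
--         for cdx in range(base_cdx, base_cdx+shape[1]):
--             if board[rdx][cdx] == target: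
--                 board[rdx][cdx] = 0
--
--     return counter
-- ===== SOURCE B (Python) =====
-- def possible_to_delete(base_rdx, base_cdx, board, shape):
--     N = len(board)
--     if base_rdx + shape[0] > N or base_cdx + shape[1] > N:
--         return False
--
--     cells = [board[r][c]
--              for r in range(base_rdx, base_rdx + shape[0])
--              for c in range(base_cdx, base_cdx + shape[1])]
--
--     if 0 in cells:
--         return False
--
--     # Sort descending: a deletable region is exactly one whose 4 largest cells
--     # are equal and positive while everything after them is negative.
--     s = sorted(cells, reverse=True)
--     if len(s) < 4 or s[0] <= 0 or s[3] != s[0]: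
--         return False
--     if len(s) > 4 and s[4] > 0:
--         return False
--
--     target = s[0]
--     for r in range(base_rdx, base_rdx + shape[0]):
--         for c in range(base_cdx, base_cdx + shape[1]):
--             if board[r][c] == target:
--                 board[r][c] = 0
--     return 4
-- ===== Notes on version B (the rewrite author's own statement) =====
-- stated objective: alternative
-- what changed: Replaces A's helper-based first-positive target search plus stateful early-return counting loop with sort-then-inspect: sort the region's cells descending and accept exactly when the 4 largest cells are equal and positive and the 5th (if any) is negative.
-- outside the precondition, e.g. on possible_to_delete(0, 0, [[0, 1], [2]], (2, 2)): A returns False, B raises IndexError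
import Mathlib
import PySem

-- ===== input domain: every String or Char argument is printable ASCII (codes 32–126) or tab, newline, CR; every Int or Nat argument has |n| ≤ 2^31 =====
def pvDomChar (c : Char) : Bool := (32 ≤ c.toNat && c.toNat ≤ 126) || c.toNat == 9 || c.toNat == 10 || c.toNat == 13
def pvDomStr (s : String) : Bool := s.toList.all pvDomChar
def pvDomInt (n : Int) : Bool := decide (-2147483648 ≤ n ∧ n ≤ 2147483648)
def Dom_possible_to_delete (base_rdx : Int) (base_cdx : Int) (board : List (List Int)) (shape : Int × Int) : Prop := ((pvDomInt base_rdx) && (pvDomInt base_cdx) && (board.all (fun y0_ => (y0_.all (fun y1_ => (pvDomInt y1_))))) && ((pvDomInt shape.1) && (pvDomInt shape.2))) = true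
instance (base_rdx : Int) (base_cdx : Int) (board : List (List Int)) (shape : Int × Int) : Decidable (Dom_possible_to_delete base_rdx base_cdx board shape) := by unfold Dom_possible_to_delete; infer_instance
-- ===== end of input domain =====

-- B sorts the region's cells in descending order and decides deletability by inspecting the
-- sort's boundary (4 equal positive cells at the front, nothing positive after) instead of
-- A's first-positive search plus stateful early-return counting loop.
-- Both Pythons mutate `board` on success (identically); the equivalence proved here is about
-- the RETURN value (Python returns the truthy int 4 on success, ported as `true`).

-- Python's board[r][c] (negative indices wrap); exact under Pre_, returns 0 where Python raises IndexError.
def pyCell (board : List (List Int)) (r c : Int) : Int :=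
  PySem.List.pyGetD (PySem.List.pyGetD board r []) c 0

-- ===== PORT A =====
def gtbInner (board : List (List Int)) (rdx : Int) : List Int → Option Int
  | [] => none
  | c :: cs =>
    if 0 < pyCell board rdx c then some (pyCell board rdx c) else gtbInner board rdx cs

def gtbOuter (board : List (List Int)) (base_cdx s2 : Int) : List Int → Option Int
  | [] => none
  | r :: rs =>
    match gtbInner board r (PySem.List.pyRange base_cdx (base_cdx + s2) 1) with
    | some t => some t
    | none => gtbOuter board base_cdx s2 rs

def get_target_block (base_rdx base_cdx : Int) (board : List (List Int)) (shape : Int × Int) : Int :=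
  let target := pyCell board base_rdx base_cdx
  if 0 < target then target
  else
    match gtbOuter board base_cdx shape.2 (PySem.List.pyRange base_rdx (base_rdx + shape.1) 1) with
    | some t => t
    | none => target

def cntInner (board : List (List Int)) (target rdx : Int) : List Int → Int → Option Int
  | [], counter => some counter
  | c :: cs, counter =>
    let v := pyCell board rdx c
    if v = 0 then none
    else if v = target then cntInner board target rdx cs (counter + 1)
    else if 0 < v ∧ v ≠ target then none
    else cntInner board target rdx cs counter

def cntOuter (board : List (List Int)) (target base_cdx s2 : Int) : List Int → Int → Option Int
  | [], counter => some counter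
  | r :: rs, counter =>
    match cntInner board target r (PySem.List.pyRange base_cdx (base_cdx + s2) 1) counter with
    | none => none
    | some k => cntOuter board target base_cdx s2 rs k

def possible_to_delete (base_rdx : Int) (base_cdx : Int) (board : List (List Int)) (shape : Int × Int) : Bool :=
  let N : Int := board.length
  if base_rdx + shape.1 > N || base_cdx + shape.2 > N then false
  else
    let target := get_target_block base_rdx base_cdx board shape
    if target ≤ 0 then false
    else
      match cntOuter board target base_cdx shape.2 (PySem.List.pyRange base_rdx (base_rdx + shape.1) 1) 0 with
      | none => false
      | some counter => counter == 4   -- Python returns counter here (= 4, truthy); mutation loop not ported (return value only)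

-- ===== PORT B =====
def possible_to_delete_alt (base_rdx : Int) (base_cdx : Int) (board : List (List Int)) (shape : Int × Int) : Bool :=
  let N : Int := board.length
  if base_rdx + shape.1 > N || base_cdx + shape.2 > N then false
  else
    let cells := (PySem.List.pyRange base_rdx (base_rdx + shape.1) 1).flatMap
      (fun r => (PySem.List.pyRange base_cdx (base_cdx + shape.2) 1).map (fun c => pyCell board r c))
    if cells.contains 0 then false
    else
      let s := PySem.List.sorted cells (fun v => v) true
      if decide (s.length < 4) || decide (PySem.List.pyGetD s 0 0 ≤ 0)
          || (PySem.List.pyGetD s 3 0 != PySem.List.pyGetD s 0 0) then false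
      else if decide (4 < s.length) && decide (0 < PySem.List.pyGetD s 4 0) then false
      else true   -- Python returns 4 here (truthy); mutation loop not ported (return value only)

-- ===== PRECONDITION & SPEC =====
def cellOK (board : List (List Int)) (r c : Int) : Bool :=
  match PySem.List.pyGet? board r with
  | none => false
  | some row => (PySem.List.pyGet? row c).isSome

-- physical row index i is one of the accessed row indices r ∈ [base_rdx, base_rdx+shape.1) (negative r wraps to i = N + r)
def rowAccessed (base_rdx : Int) (s1 : Int) (n : Int) (i : Int) : Prop :=
  (base_rdx ≤ i ∧ i < base_rdx + s1) ∨ (base_rdx ≤ i - n ∧ i - n < base_rdx + s1)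

-- Pre_ excludes exactly the inputs on which an accessed board[r][c] would raise IndexError in
-- Python (ragged/too-short rows, indices below -N): A may return False early on some of those
-- (see cites) while B, which reads every region cell first, raises there.
def Pre_possible_to_delete (base_rdx : Int) (base_cdx : Int) (board : List (List Int)) (shape : Int × Int) : Prop :=
  (base_rdx + shape.1 ≤ (board.length : Int) ∧ base_cdx + shape.2 ≤ (board.length : Int)) →
    (cellOK board base_rdx base_cdx = true ∧
     (0 < shape.1 ∧ 0 < shape.2 →
       -(board.length : Int) ≤ base_rdx ∧
       ∀ p ∈ board.zipIdx, rowAccessed base_rdx shape.1 (board.length : Int) (p.2 : Int) →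
         -(p.1.length : Int) ≤ base_cdx ∧ base_cdx + shape.2 ≤ (p.1.length : Int)))
instance (base_rdx : Int) (base_cdx : Int) (board : List (List Int)) (shape : Int × Int) : Decidable (Pre_possible_to_delete base_rdx base_cdx board shape) := by unfold Pre_possible_to_delete rowAccessed; infer_instance

def pvWitness_possible_to_delete : Int × Int × List (List Int) × (Int × Int) :=
  (0, 0, [[1, 2], [1, 1]], (2, 2))

def Spec_possible_to_delete (base_rdx : Int) (base_cdx : Int) (board : List (List Int)) (shape : Int × Int) (out : Bool) : Prop := out = possible_to_delete_alt base_rdx base_cdx board shape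
instance (base_rdx : Int) (base_cdx : Int) (board : List (List Int)) (shape : Int × Int) (out : Bool) : Decidable (Spec_possible_to_delete base_rdx base_cdx board shape out) := by unfold Spec_possible_to_delete; infer_instance

-- ===== CLAIM (what is proved, stated in full; the proofs are below) =====
def Claim_equal_possible_to_delete : Prop := ∀ (base_rdx : Int) (base_cdx : Int) (board : List (List Int)) (shape : Int × Int), Dom_possible_to_delete base_rdx base_cdx board shape → Pre_possible_to_delete base_rdx base_cdx board shape → Spec_possible_to_delete base_rdx base_cdx board shape (possible_to_delete base_rdx base_cdx board shape)

-- ===== LEMMAS AND PROOFS =====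

-- first positive element of a list
def firstPos : List Int → Option Int
  | [] => none
  | v :: vs => if 0 < v then some v else firstPos vs

-- flat version of A's counting loop
def cntList (t : Int) : List Int → Int → Option Int
  | [], k => some k
  | v :: vs, k =>
    if v = 0 then none
    else if v = t then cntList t vs (k + 1)
    else if 0 < v ∧ v ≠ t then none
    else cntList t vs k

theorem firstPos_append (xs ys : List Int) :
    firstPos (xs ++ ys) = (match firstPos xs with | some t => some t | none => firstPos ys) := by
  induction xs with
  | nil => simp [firstPos]
  | cons v vs ih => by_cases h : 0 < v <;> simp [firstPos, h, ih]

theorem gtbInner_eq (board : List (List Int)) (r : Int) (cs : List Int) :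
    gtbInner board r cs = firstPos (cs.map (fun c => pyCell board r c)) := by
  induction cs with
  | nil => rfl
  | cons c cs ih => by_cases h : 0 < pyCell board r c <;> simp [gtbInner, firstPos, h, ih]

theorem gtbOuter_eq (board : List (List Int)) (bc s2 : Int) (rs : List Int) :
    gtbOuter board bc s2 rs =
      firstPos (rs.flatMap (fun r => (PySem.List.pyRange bc (bc + s2) 1).map (fun c => pyCell board r c))) := by
  induction rs with
  | nil => rfl
  | cons r rs ih =>
    simp only [gtbOuter, gtbInner_eq, List.flatMap_cons, firstPos_append, ih]

theorem cntList_append (t : Int) (xs ys : List Int) (k : Int) :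
    cntList t (xs ++ ys) k = (match cntList t xs k with | none => none | some k' => cntList t ys k') := by
  induction xs generalizing k with
  | nil => simp [cntList]
  | cons v vs ih =>
    simp only [List.cons_append, cntList]
    split_ifs <;> simp [ih]

theorem cntInner_eq (board : List (List Int)) (t r : Int) (cs : List Int) (k : Int) :
    cntInner board t r cs k = cntList t (cs.map (fun c => pyCell board r c)) k := by
  induction cs generalizing k with
  | nil => rfl
  | cons c cs ih => simp only [cntInner, cntList, List.map_cons]; split_ifs <;> simp [ih]

theorem cntOuter_eq (board : List (List Int)) (t bc s2 : Int) (rs : List Int) (k : Int) :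
    cntOuter board t bc s2 rs k =
      cntList t (rs.flatMap (fun r => (PySem.List.pyRange bc (bc + s2) 1).map (fun c => pyCell board r c))) k := by
  induction rs generalizing k with
  | nil => rfl
  | cons r rs ih =>
    simp only [cntOuter, cntInner_eq, List.flatMap_cons, cntList_append]
    cases h : cntList t ((PySem.List.pyRange bc (bc + s2) 1).map (fun c => pyCell board r c)) k <;> simp [ih]

theorem firstPos_some (vs : List Int) (t : Int) (h : firstPos vs = some t) : 0 < t ∧ t ∈ vs := by
  induction vs with
  | nil => simp [firstPos] at h
  | cons v vs ih =>
    by_cases hv : 0 < v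
    · simp [firstPos, hv] at h; subst h; exact ⟨hv, by simp⟩
    · simp only [firstPos, if_neg hv] at h
      obtain ⟨h1, h2⟩ := ih h
      exact ⟨h1, by simp [h2]⟩

theorem firstPos_none (vs : List Int) (h : firstPos vs = none) : ∀ v ∈ vs, ¬0 < v := by
  induction vs with
  | nil => simp
  | cons v vs ih =>
    by_cases hv : 0 < v
    · simp [firstPos, hv] at h
    · intro w hw
      rcases List.mem_cons.mp hw with rfl | hw
      · exact hv
      · exact ih (by simpa [firstPos, hv] using h) w hw

theorem cntList_none (t : Int) (vs : List Int) (k : Int) (v : Int) (hv : v ∈ vs)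
    (hbad : v = 0 ∨ (0 < v ∧ v ≠ t)) : cntList t vs k = none := by
  induction vs generalizing k with
  | nil => simp at hv
  | cons w ws ih =>
    rcases List.mem_cons.mp hv with h | h
    · subst h
      rcases hbad with h0 | ⟨hp, hne⟩
      · simp [cntList, h0]
      · have h0 : v ≠ 0 := by omega
        simp [cntList, h0, hne, hp]
    · simp only [cntList]
      split_ifs <;> first | rfl | exact ih _ h

theorem cntList_some (t : Int) (vs : List Int) (k : Int)
    (h : ∀ v ∈ vs, v ≠ 0 ∧ (0 < v → v = t)) :
    cntList t vs k = some (k + (vs.count t : Int)) := by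
  induction vs generalizing k with
  | nil => simp [cntList]
  | cons v ws ih =>
    obtain ⟨h0, hp⟩ := h v (by simp)
    have hrest : ∀ v ∈ ws, v ≠ 0 ∧ (0 < v → v = t) := fun w hw => h w (by simp [hw])
    by_cases ht : v = t
    · subst ht
      simp only [cntList, if_neg h0, ih _ hrest]
      simp; ring
    · have : ¬(0 < v ∧ v ≠ t) := by intro ⟨a, b⟩; exact ht (hp a)
      simp only [cntList, if_neg h0, if_neg ht, if_neg this, ih _ hrest]
      simp [ht]

theorem cells_head (base_rdx base_cdx : Int) (board : List (List Int)) (shape : Int × Int)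
    (h : (PySem.List.pyRange base_rdx (base_rdx + shape.1) 1).flatMap
      (fun r => (PySem.List.pyRange base_cdx (base_cdx + shape.2) 1).map (fun c => pyCell board r c)) ≠ []) :
    ∃ rest, (PySem.List.pyRange base_rdx (base_rdx + shape.1) 1).flatMap
      (fun r => (PySem.List.pyRange base_cdx (base_cdx + shape.2) 1).map (fun c => pyCell board r c))
      = pyCell board base_rdx base_cdx :: rest := by
  by_cases h1 : base_rdx < base_rdx + shape.1
  · by_cases h2 : base_cdx < base_cdx + shape.2
    · rw [PySem.List.pyRange_one_cons h1, PySem.List.pyRange_one_cons h2]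
      simp only [List.flatMap_cons, List.map_cons, List.cons_append]
      exact ⟨_, rfl⟩
    · exact absurd (by rw [PySem.List.pyRange_one_eq_nil (by omega : base_cdx + shape.2 ≤ base_cdx)]; simp) h
  · exact absurd (by rw [PySem.List.pyRange_one_eq_nil (by omega : base_rdx + shape.1 ≤ base_rdx)]; simp) h

theorem get_target_block_eq (base_rdx base_cdx : Int) (board : List (List Int)) (shape : Int × Int) :
    get_target_block base_rdx base_cdx board shape =
      (firstPos ((PySem.List.pyRange base_rdx (base_rdx + shape.1) 1).flatMap
        (fun r => (PySem.List.pyRange base_cdx (base_cdx + shape.2) 1).map (fun c => pyCell board r c)))).getD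
        (pyCell board base_rdx base_cdx) := by
  unfold get_target_block
  rw [gtbOuter_eq]
  by_cases hnil : (PySem.List.pyRange base_rdx (base_rdx + shape.1) 1).flatMap
      (fun r => (PySem.List.pyRange base_cdx (base_cdx + shape.2) 1).map (fun c => pyCell board r c)) = []
  · rw [hnil]
    simp only [firstPos, Option.getD_none]
    split_ifs <;> rfl
  · obtain ⟨rest, hdec⟩ := cells_head base_rdx base_cdx board shape hnil
    rw [hdec]
    by_cases hp : 0 < pyCell board base_rdx base_cdx
    · simp [firstPos, hp]
    · simp only [firstPos, if_neg hp]
      cases firstPos rest <;> simp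

-- descending-sorted nonzero list: the condition B checks holds iff the positives are exactly 4 copies of one value
theorem bcond_iff (s : List Int) (hp : s.Pairwise (fun a b => b ≤ a)) (hz : (0 : Int) ∉ s) :
    ((if decide (s.length < 4) || decide (PySem.List.pyGetD s 0 0 ≤ 0)
          || (PySem.List.pyGetD s 3 0 != PySem.List.pyGetD s 0 0) then false
      else if decide (4 < s.length) && decide (0 < PySem.List.pyGetD s 4 0) then false
      else true) = true)
    ↔ ∃ t : Int, 0 < t ∧ s.filter (fun v => decide (0 < v)) = List.replicate 4 t := by
  by_cases hlen : s.length < 4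
  · simp only [hlen, decide_true, Bool.true_or, if_pos, Bool.false_eq_true, false_iff]
    rintro ⟨t, ht, hf⟩
    have h1 := List.length_filter_le (fun v => decide (0 < v)) s
    rw [hf] at h1
    simp at h1
    omega
  · rcases s with _ | ⟨a, _ | ⟨b, _ | ⟨c, _ | ⟨d, rest⟩⟩⟩⟩ <;> simp at hlen
    simp only [List.pairwise_cons] at hp
    obtain ⟨ha', hb', hc', hd', hrest⟩ := hp
    simp only [List.mem_cons, not_or] at hz
    obtain ⟨hza, hzb, hzc, hzd, hzrest⟩ := hz
    have hba : b ≤ a := ha' b (by simp)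
    have hcb : c ≤ b := hb' c (by simp)
    have hdc : d ≤ c := hc' d (by simp)
    have g0 : PySem.List.pyGetD (a::b::c::d::rest) 0 0 = a := PySem.List.pyGetD_zero_cons a _ 0
    have g3 : PySem.List.pyGetD (a::b::c::d::rest) 3 0 = d := by
      rw [PySem.List.pyGetD_eq_getElem _ _ (by omega) (by simp; omega)]; simp
    have glen : ¬ (a::b::c::d::rest).length < 4 := by simp
    constructor
    · intro hL
      rw [g0, g3] at hL
      cases rest with
      | nil =>
        split_ifs at hL with h1 h2
        all_goals try simp at hL
        simp at h1
        obtain ⟨hA, hD⟩ := h1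
        have ha : 0 < a := by omega
        refine ⟨a, ha, ?_⟩
        rw [show b = a by omega, show c = a by omega, hD]
        simp [ha, List.replicate]
      | cons e rest' =>
        have g4 : PySem.List.pyGetD (a::b::c::d::e::rest') 4 0 = e := by
          rw [PySem.List.pyGetD_eq_getElem _ _ (by omega) (by simp; omega)]; simp
        rw [g4] at hL
        split_ifs at hL with h1 h2
        all_goals try simp at hL
        simp at h1
        obtain ⟨hA, hD⟩ := h1
        simp at h2
        have hE : e ≤ 0 := by omega
        have ha : 0 < a := by omega
        have frest : (e::rest').filter (fun v => decide (0 < v)) = [] := by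
          refine List.filter_eq_nil_iff.mpr (fun x hx => ?_)
          rcases List.mem_cons.mp hx with rfl | hx
          · simp; omega
          · have := (List.pairwise_cons.mp hrest).1 x hx
            simp; omega
        refine ⟨a, ha, ?_⟩
        rw [show b = a by omega, show c = a by omega, hD]
        rw [List.filter_cons_of_pos (by simpa using ha), List.filter_cons_of_pos (by simpa using ha),
          List.filter_cons_of_pos (by simpa using ha), List.filter_cons_of_pos (by simpa using ha), frest]
        simp [List.replicate]
    · rintro ⟨t, ht, hf⟩
      have ha : 0 < a := by
        by_contra hA
        push Not at hA
        have hfn : List.filter (fun v => decide (0 < v)) (a::b::c::d::rest) = [] := by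
          refine List.filter_eq_nil_iff.mpr (fun x hx => ?_)
          rcases List.mem_cons.mp hx with rfl | hx
          · simp; omega
          · have := ha' x hx
            simp; omega
        rw [hfn] at hf
        have := congrArg List.length hf
        simp at this
      have hat : a = t := by
        have : a ∈ List.replicate 4 t := hf ▸ List.mem_filter.mpr ⟨by simp, by simpa using ha⟩
        exact List.eq_of_mem_replicate this
      have hd : 0 < d := by
        by_contra hD
        push Not at hD
        have hsplit : (a::b::c::d::rest) = [a, b, c] ++ (d::rest) := rfl
        rw [hsplit, List.filter_append] at hf
        have hnil : List.filter (fun v => decide (0 < v)) (d::rest) = [] := by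
          refine List.filter_eq_nil_iff.mpr (fun x hx => ?_)
          rcases List.mem_cons.mp hx with rfl | hx
          · simp; omega
          · have := hd' x hx
            simp; omega
        rw [hnil, List.append_nil] at hf
        have h1 := List.length_filter_le (fun v => decide (0 < v)) [a, b, c]
        rw [hf] at h1
        simp at h1
      have hdt : d = t := by
        have : d ∈ List.replicate 4 t := hf ▸ List.mem_filter.mpr ⟨by simp, by simpa using hd⟩
        exact List.eq_of_mem_replicate this
      have hda : d = a := by omega
      have hc1 : (decide ((a::b::c::d::rest).length < 4) || decide (a ≤ 0) || (d != a)) = false := by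
        simp [hda]
        omega
      rw [g0, g3, hc1]
      simp only [Bool.false_eq_true, if_false]
      cases rest with
      | nil => simp
      | cons e rest' =>
        have g4 : PySem.List.pyGetD (a::b::c::d::e::rest') 4 0 = e := by
          rw [PySem.List.pyGetD_eq_getElem _ _ (by omega) (by simp; omega)]; simp
        have hE : ¬ 0 < e := by
          intro hE
          have hflen : (List.filter (fun v => decide (0 < v)) (a::b::c::d::e::rest')).length = 4 := by
            rw [hf]; simp
          simp only [List.filter_cons, show (decide (0 < a)) = true by simpa using ha,
            show (decide (0 < b)) = true by simp; omega,
            show (decide (0 < c)) = true by simp; omega,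
            show (decide (0 < d)) = true by simpa using hd,
            show (decide (0 < e)) = true by simpa using hE, if_pos] at hflen
          simp at hflen
        rw [g4]
        simp [hE]

-- first positive of a list all of whose positives are t
theorem firstPos_eq (vs : List Int) (t : Int) (h1 : t ∈ vs) (h2 : 0 < t)
    (h3 : ∀ v ∈ vs, 0 < v → v = t) : firstPos vs = some t := by
  induction vs with
  | nil => simp at h1
  | cons v ws ih =>
    by_cases hv : 0 < v
    · have hvt := h3 v (by simp) hv
      subst hvt
      simp [firstPos, hv]
    · simp only [firstPos, if_neg hv]
      refine ih ?_ (fun w hw hp => h3 w (by simp [hw]) hp)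
      rcases List.mem_cons.mp h1 with rfl | h
      · omega
      · exact h

-- B's verdict on the unsorted cell list
theorem bcond_cells (cs : List Int) (hz : (0 : Int) ∉ cs) :
    ((if decide ((PySem.List.sorted cs (fun v => v) true).length < 4)
          || decide (PySem.List.pyGetD (PySem.List.sorted cs (fun v => v) true) 0 0 ≤ 0)
          || (PySem.List.pyGetD (PySem.List.sorted cs (fun v => v) true) 3 0 !=
              PySem.List.pyGetD (PySem.List.sorted cs (fun v => v) true) 0 0) then false
      else if decide (4 < (PySem.List.sorted cs (fun v => v) true).length)
          && decide (0 < PySem.List.pyGetD (PySem.List.sorted cs (fun v => v) true) 4 0) then false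
      else true) = true)
    ↔ ∃ t : Int, 0 < t ∧ cs.filter (fun v => decide (0 < v)) = List.replicate 4 t := by
  have hperm : (PySem.List.sorted cs (fun v => v) true).Perm cs := PySem.List.sorted_perm cs (fun v => v) true
  rw [bcond_iff _ (PySem.List.sorted_pairwise_rev cs (fun v => v)) (fun h => hz (hperm.mem_iff.mp h))]
  constructor <;> rintro ⟨t, ht, hf⟩ <;> refine ⟨t, ht, ?_⟩
  · exact List.perm_replicate.mp (hf ▸ (hperm.filter _).symm)
  · exact List.perm_replicate.mp (hf ▸ (hperm.filter _))

-- ===== VERDICT (by name: the statement is the Claim_ definition above) =====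
theorem possible_to_delete_spec : Claim_equal_possible_to_delete := by
  intro base_rdx base_cdx board shape _ _
  unfold Spec_possible_to_delete possible_to_delete possible_to_delete_alt
  by_cases hb : (decide (base_rdx + shape.1 > (board.length : Int)) ||
      decide (base_cdx + shape.2 > (board.length : Int))) = true
  · rw [if_pos hb, if_pos hb]
  · rw [if_neg hb, if_neg hb]
    simp only [get_target_block_eq, cntOuter_eq]
    set cs := (PySem.List.pyRange base_rdx (base_rdx + shape.1) 1).flatMap
      (fun r => (PySem.List.pyRange base_cdx (base_cdx + shape.2) 1).map (fun c => pyCell board r c))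
      with hcs
    by_cases hz : (0 : Int) ∈ cs
    · have hcontains : cs.contains 0 = true := by simpa using hz
      rw [if_pos hcontains, cntList_none _ cs 0 0 hz (Or.inl rfl)]
      split_ifs <;> rfl
    · have hcontains : ¬ cs.contains 0 = true := by simpa using hz
      rw [if_neg hcontains]
      by_cases hex : ∃ t : Int, 0 < t ∧ cs.filter (fun v => decide (0 < v)) = List.replicate 4 t
      · rw [(bcond_cells cs hz).mpr hex]
        obtain ⟨t, ht, hfil⟩ := hex
        have hall : ∀ v ∈ cs, 0 < v → v = t := fun v hv hp =>
          List.eq_of_mem_replicate (hfil ▸ List.mem_filter.mpr ⟨hv, by simpa using hp⟩)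
        have htmem : t ∈ cs := by
          have : t ∈ cs.filter (fun v => decide (0 < v)) := by rw [hfil]; simp
          exact (List.mem_filter.mp this).1
        rw [firstPos_eq cs t htmem ht hall]
        simp only [Option.getD_some]
        rw [if_neg (by omega : ¬ t ≤ 0)]
        rw [cntList_some t cs 0 (fun v hv => ⟨fun h => hz (h ▸ hv), fun hp => hall v hv hp⟩)]
        have hcount : cs.count t = 4 := by
          have : cs.count t = (cs.filter (fun v => decide (0 < v))).length := by
            rw [List.count_eq_countP, ← List.countP_eq_length_filter]
            exact (List.countP_congr (fun v hv => by
              constructor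
              · intro h; have : 0 < v := by simpa using h
                simp [hall v hv this]
              · intro h
                have hvt : v = t := by simpa using h
                rw [hvt]; simpa using ht)).symm
          rw [this, hfil, List.length_replicate]
        simp [hcount]
      · have hB : _ = false := Bool.eq_false_iff.mpr (fun h => hex ((bcond_cells cs hz).mp h))
        rw [hB]
        cases hf : firstPos cs with
        | none =>
          simp only [Option.getD_none]
          by_cases hcase : cs = []
          · rw [hcase]
            split_ifs <;> rfl
          · obtain ⟨rest, hdec⟩ := cells_head base_rdx base_cdx board shape (by rw [← hcs]; exact hcase)
            have hle : pyCell board base_rdx base_cdx ≤ 0 := by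
              have := firstPos_none cs hf (pyCell board base_rdx base_cdx) (by rw [hcs, hdec]; simp)
              omega
            rw [if_pos (by simpa using hle)]
        | some t0 =>
          obtain ⟨ht0pos, ht0mem⟩ := firstPos_some cs t0 hf
          simp only [Option.getD_some]
          rw [if_neg (by omega : ¬ t0 ≤ 0)]
          by_cases hbadp : ∃ v ∈ cs, 0 < v ∧ v ≠ t0
          · obtain ⟨v, hv, hvp, hvne⟩ := hbadp
            rw [cntList_none t0 cs 0 v hv (Or.inr ⟨hvp, hvne⟩)]
          · push Not at hbadp
            rw [cntList_some t0 cs 0 (fun v hv => ⟨fun h => hz (h ▸ hv), fun hp => hbadp v hv hp⟩)]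
            have h4 : cs.count t0 ≠ 4 := by
              intro h4
              refine hex ⟨t0, ht0pos, List.eq_replicate_iff.mpr ⟨?_, ?_⟩⟩
              · rw [← List.countP_eq_length_filter, ← h4, List.count_eq_countP]
                exact List.countP_congr (fun v hv => by
                  constructor
                  · intro h; have : 0 < v := by simpa using h
                    simp [hbadp v hv this]
                  · intro h
                    have hvt : v = t0 := by simpa using h
                    rw [hvt]; simpa using ht0pos)
              · intro v hv
                obtain ⟨hvm, hvp⟩ := List.mem_filter.mp hv
                exact hbadp v hvm (by simpa using hvp)
            simp only [Int.zero_add]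
            simpa using fun h => h4 (by exact_mod_cast h)
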